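-- pv_equiv track=rewrite | github.com/mkalejta/AlgorytmyNumeryczne | zad_01/zadanie1_P.py | heap_sum
-- ===== SOURCE A (Python) =====
-- import heapq
--
-- def heap_sum(values, reverse=False):
--
--     if len(values) == 0:
--         return 0
--
--     heap = list(values)
--     if reverse:
--         heap = [-x for x in heap]  # Odwrócenie znaków, aby symulować kopiec max
--     heapq.heapify(heap)  # Tworzenie kopca min
--
--     while len(heap) > 1:
--         a = heapq.heappop(heap)
--         b = heapq.heappop(heap)
--         heapq.heappush(heap, a + b)  # Wstawiamy sumę z powrotem
--
--     return -heap[0] if reverse else heap[0]  # Odwracamy znak jeśli to kopiec max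
-- ===== SOURCE B (Python) =====
-- def heap_sum(values, reverse=False):
--     # On integers, repeatedly replacing the two smallest heap elements by their
--     # sum always terminates in the total sum (negations for reverse cancel).
--     return sum(values)
-- ===== Notes on version B (the rewrite author's own statement) =====
-- stated objective: faster
-- what changed: Replaces the heapify/pop-pop-push loop with the closed form sum(values): on integers each step replaces two elements by their sum, so the final element is exactly the total (the reverse negations cancel), and the len==0 case already yields 0.
import Mathlib
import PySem

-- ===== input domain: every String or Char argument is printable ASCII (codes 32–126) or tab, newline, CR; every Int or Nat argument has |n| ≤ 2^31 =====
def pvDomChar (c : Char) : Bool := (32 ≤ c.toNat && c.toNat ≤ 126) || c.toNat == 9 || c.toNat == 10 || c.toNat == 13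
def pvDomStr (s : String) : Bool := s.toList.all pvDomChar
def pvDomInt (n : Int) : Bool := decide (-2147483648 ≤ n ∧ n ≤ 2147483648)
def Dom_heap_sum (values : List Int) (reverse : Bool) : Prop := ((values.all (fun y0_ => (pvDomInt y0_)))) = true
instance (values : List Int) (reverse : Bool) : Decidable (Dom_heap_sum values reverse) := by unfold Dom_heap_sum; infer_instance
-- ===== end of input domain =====

-- B replaces A's heapify/pop-pop-push loop by the closed form sum(values) (exact on integers); faster.


-- ===== PORT A =====
-- heapq on Int is modelled at value level: heappop returns the minimum element
-- (ties are indistinguishable on Int), heappush adds the element; heapify does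
-- not change the multiset; heap[0] is the remaining element. Exact for
-- everything A observes.
-- the 'while len(heap) > 1' loop of A
def heapLoop (h : List Int) : List Int :=
  if hl : 1 < h.length then
    match hm : h.min? with
    | none => h                -- unreachable (h ≠ [])
    | some a =>
      match hm2 : (h.erase a).min? with
      | none => h              -- unreachable ((h.erase a) ≠ [])
      | some b => heapLoop ((a + b) :: (h.erase a).erase b)
  else h
termination_by h.length
decreasing_by
  have ha : a ∈ h := List.min?_mem hm
  have hb : b ∈ h.erase a := List.min?_mem hm2
  have l1 : (h.erase a).length = h.length - 1 := List.length_erase_of_mem ha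
  have l2 : ((h.erase a).erase b).length = (h.erase a).length - 1 := List.length_erase_of_mem hb
  simp only [List.length_cons, l2, l1]
  omega

def heap_sum (values : List Int) (reverse : Bool) : Int :=
  if values.length = 0 then 0
  else
    let heap := values
    let heap := if reverse then heap.map (fun x => -x) else heap
    let heap := heapLoop heap
    -- A returns heap[0]; the loop always ends with one element, default unreachable
    if reverse then -(heap.headD 0) else heap.headD 0

-- ===== PORT B =====
def heap_sum_alt (values : List Int) (reverse : Bool) : Int :=
  values.foldl (· + ·) 0       -- sum(values)

-- ===== PRECONDITION & SPEC =====
def Spec_heap_sum (values : List Int) (reverse : Bool) (out : Int) : Prop := out = heap_sum_alt values reverse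
instance (values : List Int) (reverse : Bool) (out : Int) : Decidable (Spec_heap_sum values reverse out) := by unfold Spec_heap_sum; infer_instance

-- ===== CLAIM (what is proved, stated in full; the proofs are below) =====
def Claim_equal_heap_sum : Prop := ∀ (values : List Int) (reverse : Bool), Dom_heap_sum values reverse → Spec_heap_sum values reverse (heap_sum values reverse)

-- ===== LEMMAS AND PROOFS =====

theorem sum_erase_of_mem {a : Int} {l : List Int} (h : a ∈ l) :
    (l.erase a).sum = l.sum - a := by
  have := (List.perm_cons_erase h).sum_eq
  simp at this
  omega

theorem heapLoop_eq_sum (h : List Int) (hne : h ≠ []) : heapLoop h = [h.sum] := by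
  induction h using heapLoop.induct with
  | case3 h hl a hm b hm2 ih =>
      have ha : a ∈ h := List.min?_mem hm
      have hb : b ∈ h.erase a := List.min?_mem hm2
      rw [heapLoop, dif_pos hl]
      split
      · next heq => rw [heq] at hm; cases hm
      · next a' heq =>
        rw [hm] at heq
        injection heq with h1
        subst h1
        split
        · next heq2 => rw [heq2] at hm2; cases hm2
        · next b' heq2 =>
          rw [hm2] at heq2
          injection heq2 with h2
          subst h2
          rw [ih (by simp)]
          have e1 : (h.erase a).sum = h.sum - a := sum_erase_of_mem ha
          have e2 : ((h.erase a).erase b).sum = (h.erase a).sum - b := sum_erase_of_mem hb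
          simp only [List.sum_cons, e2, e1]
          ring_nf
  | case1 h hl hm =>
      exact absurd (List.min?_eq_none_iff.mp hm) hne
  | case2 h hl a hm hm2 =>
      have ha : a ∈ h := List.min?_mem hm
      have : (h.erase a).length = h.length - 1 := List.length_erase_of_mem ha
      have : h.erase a ≠ [] := by
        intro he
        rw [he] at this
        simp at this
        omega
      exact absurd (List.min?_eq_none_iff.mp hm2) this
  | case4 h hl =>
      rw [heapLoop, dif_neg hl]
      match h, hne with
      | [x], _ => simp
      | x :: y :: t, _ => simp at hl

theorem sum_map_neg (l : List Int) : (l.map (fun x => -x)).sum = -l.sum := by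
  induction l with
  | nil => simp
  | cons x t ih => simp [ih]; ring

theorem foldl_add_eq_sum (l : List Int) : l.foldl (· + ·) 0 = l.sum := by
  simp [List.sum_eq_foldl]

-- ===== VERDICT (by name: the statement is the Claim_ definition above) =====
theorem heap_sum_spec : Claim_equal_heap_sum := by
  intro values reverse _
  unfold Spec_heap_sum heap_sum heap_sum_alt
  rw [foldl_add_eq_sum]
  by_cases hz : values.length = 0
  · have : values = [] := List.length_eq_zero_iff.mp hz
    simp [this]
  · have hne : values ≠ [] := by
      intro he; exact hz (by simp [he])
    simp only [if_neg hz]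
    cases reverse with
    | false => simp [heapLoop_eq_sum values hne]
    | true =>
        have hne' : values.map (fun x => -x) ≠ [] := by simp [hne]
        simp [heapLoop_eq_sum _ hne', sum_map_neg]
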